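-- pv_equiv track=rewrite | github.com/yhzhu99/HealthFlow | healthflow/web_app.py | _default_selected_file
-- ===== SOURCE A (Python) =====
-- from typing import Any, Callable, Sequence
--
-- def _default_selected_file(
--     catalog: Sequence[dict[str, Any]],
--     preferred_file: str | None = None,
-- ) -> str | None:
--     if preferred_file and any(str(item.get("source_path")) == preferred_file for item in catalog):
--         return preferred_file
--     if not catalog:
--         return None
--     report_item = next((item for item in catalog if item.get("origin") == "report"), None)
--     if report_item is not None:
--         return str(report_item.get("source_path"))
--     return str(catalog[0].get("source_path"))
-- ===== SOURCE B (Python) =====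
-- def _default_selected_file(catalog, preferred_file=None):
--     # single pass over catalog maintaining three locals instead of three scans
--     preferred_found = False
--     first_report = None
--     first_item = None
--     for item in catalog:
--         if preferred_file and str(item.get("source_path")) == preferred_file:
--             preferred_found = True
--         if first_report is None and item.get("origin") == "report":
--             first_report = item
--         if first_item is None:
--             first_item = item
--     if preferred_found:
--         return preferred_file
--     if first_report is not None:
--         return str(first_report.get("source_path"))
--     if first_item is not None:
--         return str(first_item.get("source_path"))
--     return None
-- ===== Notes on version B (the rewrite author's own statement) =====
-- stated objective: alternative
-- what changed: Replaces A's three independent traversals (any-scan for the preferred path, next() scan for the first report item, catalog[0] access) by a single for-loop that maintains preferred_found, first_report and first_item, then one branch cascade at the end.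
import Mathlib
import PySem

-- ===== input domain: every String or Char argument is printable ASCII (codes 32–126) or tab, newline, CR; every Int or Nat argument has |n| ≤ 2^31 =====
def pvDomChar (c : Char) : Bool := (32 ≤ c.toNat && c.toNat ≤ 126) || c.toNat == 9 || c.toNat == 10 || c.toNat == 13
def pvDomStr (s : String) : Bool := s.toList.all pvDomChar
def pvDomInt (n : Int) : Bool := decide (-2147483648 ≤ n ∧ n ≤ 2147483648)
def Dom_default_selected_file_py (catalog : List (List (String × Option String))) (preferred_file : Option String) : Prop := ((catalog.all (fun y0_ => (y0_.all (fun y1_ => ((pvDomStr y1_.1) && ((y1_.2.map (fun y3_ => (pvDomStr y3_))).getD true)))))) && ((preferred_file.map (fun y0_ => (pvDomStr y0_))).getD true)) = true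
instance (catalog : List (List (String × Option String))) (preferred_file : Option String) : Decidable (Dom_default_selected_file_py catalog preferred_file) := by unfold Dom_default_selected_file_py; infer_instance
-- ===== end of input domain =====

-- B replaces A's three independent scans (any, next(...), catalog[0]) by one
-- traversal maintaining three locals; same return value, same O(n) cost (objective: alternative).

-- shared primitive: item.get(k) on a first-match association list (Python dict.get)
def pvGet (item : List (String × Option String)) (k : String) : Option (Option String) :=
  (item.find? (fun kv => kv.1 == k)).map (·.2)

-- str(x) where x : str | None  (str(None) = "None")
def pvStr (v : Option (Option String)) : String := (Option.join v).getD "None"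

def pvSrc (item : List (String × Option String)) : String := pvStr (pvGet item "source_path")

def pvIsReport (item : List (String × Option String)) : Bool :=
  pvGet item "origin" == some (some "report")

-- ===== PORT A =====
def default_selected_file_py (catalog : List (List (String × Option String))) (preferred_file : Option String) : Option String :=
  if (match preferred_file with
      | some p => !(p == "") && catalog.any (fun item => pvSrc item == p)
      | none => false)
  then preferred_file
  else match catalog with
    | [] => none
    | first :: _ =>
      match catalog.find? pvIsReport with
      | some item => some (pvSrc item)
      | none => some (pvSrc first)

-- ===== PORT B =====
-- 'preferred_file and str(item.get("source_path")) == preferred_file' for one item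
def pvPred (preferred_file : Option String) (item : List (String × Option String)) : Bool :=
  match preferred_file with
  | some p => !(p == "") && (pvSrc item == p)
  | none => false

-- one loop iteration updating (preferred_found, first_report, first_item)
def pvStep (preferred_file : Option String)
    (st : Bool × Option (List (String × Option String)) × Option (List (String × Option String)))
    (item : List (String × Option String)) :
    Bool × Option (List (String × Option String)) × Option (List (String × Option String)) :=
  (st.1 || pvPred preferred_file item,
   match st.2.1 with
   | none => if pvIsReport item then some item else none
   | some x => some x,
   match st.2.2 with
   | none => some item
   | some x => some x)

def default_selected_file_py_alt (catalog : List (List (String × Option String))) (preferred_file : Option String) : Option String :=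
  let st := catalog.foldl (pvStep preferred_file) (false, none, none)
  if st.1 then preferred_file
  else match st.2.1 with
    | some it => some (pvSrc it)
    | none =>
      match st.2.2 with
      | some it => some (pvSrc it)
      | none => none

-- ===== PRECONDITION & SPEC =====
def Spec_default_selected_file_py (catalog : List (List (String × Option String))) (preferred_file : Option String) (out : Option String) : Prop := out = default_selected_file_py_alt catalog preferred_file
instance (catalog : List (List (String × Option String))) (preferred_file : Option String) (out : Option String) : Decidable (Spec_default_selected_file_py catalog preferred_file out) := by unfold Spec_default_selected_file_py; infer_instance

-- ===== CLAIM (what is proved, stated in full; the proofs are below) =====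
def Claim_equal_default_selected_file_py : Prop := ∀ (catalog : List (List (String × Option String))) (preferred_file : Option String), Dom_default_selected_file_py catalog preferred_file → Spec_default_selected_file_py catalog preferred_file (default_selected_file_py catalog preferred_file)

-- ===== LEMMAS AND PROOFS =====
-- the fold's three components are exactly: init ∨ any, init <|> find?, init <|> head?
theorem pvFold_eq (pf : Option String) (l : List (List (String × Option String)))
    (b : Bool) (r f : Option (List (String × Option String))) :
    l.foldl (pvStep pf) (b, r, f)
      = (b || l.any (pvPred pf), r.or (l.find? pvIsReport), f.or l.head?) := by
  induction l generalizing b r f with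
  | nil => refine Prod.ext (by simp) (Prod.ext ?_ ?_) <;> cases r <;> cases f <;> simp [Option.or]
  | cons a t ih =>
    simp only [List.foldl_cons, pvStep, ih]
    refine Prod.ext ?_ (Prod.ext ?_ ?_)
    · simp [Bool.or_assoc]
    · cases r with
      | none => cases h : pvIsReport a <;> simp [List.find?, h, Option.or]
      | some x => simp [Option.or]
    · cases f with
      | none => simp [Option.or]
      | some x => simp [Option.or]

theorem any_pred (pf : Option String) (l : List (List (String × Option String))) :
    l.any (pvPred pf)
      = (match pf with
         | some p => !(p == "") && l.any (fun item => pvSrc item == p)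
         | none => false) := by
  cases pf with
  | none => simp [pvPred]
  | some p =>
    cases h : (p == "") with
    | true => simp [pvPred, h]
    | false =>
      simp only [show pvPred (some p) = (fun item => !(p == "") && (pvSrc item == p)) from rfl,
        h, Bool.not_false, Bool.true_and]

-- ===== VERDICT (by name: the statement is the Claim_ definition above) =====
theorem default_selected_file_py_spec : Claim_equal_default_selected_file_py := by
  intro catalog preferred_file _
  unfold Spec_default_selected_file_py default_selected_file_py default_selected_file_py_alt
  rw [pvFold_eq]
  simp only [any_pred, Bool.false_or, Option.or]
  cases h : (match preferred_file with
      | some p => !(p == "") && catalog.any (fun item => pvSrc item == p)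
      | none => false) with
  | true => simp
  | false =>
    cases catalog with
    | nil => simp
    | cons first rest =>
      simp only [Bool.false_eq_true, if_false, List.head?]
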